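-- pv_equiv track=rewrite | github.com/adriangmrraa/saasclinic | orchestrator_service/modules/dental/tools.py | slots_to_ranges
-- ===== SOURCE A (Python) =====
-- from typing import Optional, List, Dict, Any
--
-- def slots_to_ranges(slots: List[str], interval_minutes: int = 30) -> str:
--     if not slots: return ""
--     try:
--         def to_minutes(hhmm: str) -> int: h, m = map(int, hhmm.split(":")); return h * 60 + m
--         def to_hhmm(m: int) -> str: h, m = divmod(m, 60); return f"{h:02d}:{m:02d}"
--         minutes_list = sorted(set(to_minutes(s) for s in slots))
--         ranges = []
--         i = 0
--         while i < len(minutes_list):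
--             start = minutes_list[i]
--             end = start + interval_minutes
--             while i + 1 < len(minutes_list) and minutes_list[i + 1] == end:
--                 i += 1; end = minutes_list[i] + interval_minutes
--             ranges.append((to_hhmm(start), to_hhmm(end)))
--             i += 1
--         if not ranges: return ""
--         if len(ranges) == 1: return f"de {ranges[0][0]} a {ranges[0][1]}"
--         return " y ".join(f"de {a} a {b}" for a, b in ranges)
--     except: return ", ".join(slots)
-- ===== SOURCE B (Python) =====
-- def slots_to_ranges(slots, interval_minutes=30):
--     if not slots:
--         return ""
--     try:
--         def to_hhmm(m):
--             h, mm = divmod(m, 60)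
--             return f"{h:02d}:{mm:02d}"
--         minutes = sorted({h * 60 + m for h, m in (map(int, s.split(":")) for s in slots)})
--         ranges = []
--         for m in reversed(minutes):
--             if ranges and ranges[0][0] == m + interval_minutes:
--                 ranges[0] = (m, ranges[0][1])
--             else:
--                 ranges.insert(0, (m, m + interval_minutes))
--         return " y ".join(f"de {to_hhmm(a)} a {to_hhmm(b)}" for a, b in ranges)
--     except:
--         return ", ".join(slots)
-- ===== Notes on version B (the rewrite author's own statement) =====
-- stated objective: simpler
-- what changed: Replaces the forward index loop with a nested inner while and two special-cased return branches by a single backward fold over the sorted unique minutes that either extends the head range or prepends a new one, with one uniform join at the end.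
import Mathlib
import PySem

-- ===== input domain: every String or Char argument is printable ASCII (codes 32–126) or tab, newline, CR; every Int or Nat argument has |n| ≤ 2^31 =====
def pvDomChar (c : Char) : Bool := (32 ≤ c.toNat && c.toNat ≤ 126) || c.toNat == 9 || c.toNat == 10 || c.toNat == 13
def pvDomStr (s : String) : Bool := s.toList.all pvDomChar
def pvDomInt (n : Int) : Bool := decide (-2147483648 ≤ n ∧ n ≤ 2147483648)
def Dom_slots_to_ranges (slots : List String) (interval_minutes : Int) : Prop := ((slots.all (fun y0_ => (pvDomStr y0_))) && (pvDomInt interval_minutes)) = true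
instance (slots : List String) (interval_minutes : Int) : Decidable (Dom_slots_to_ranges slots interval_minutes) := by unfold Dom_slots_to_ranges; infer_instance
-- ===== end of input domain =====

-- ===== PORT A =====
-- B changes only the merge decomposition (backward fold instead of forward index loop); same parsing/formatting.
-- helpers shared by both ports: both Pythons contain the identical to_minutes / to_hhmm local functions.
-- to_minutes: 'h, m = map(int, hhmm.split(":"))' — none exactly where Python raises (wrong arity or int() ValueError)
def pvToMinutes? (s : String) : Option Int :=
  match PySem.Str.split? s ":" with
  | some [a, b] =>
    match PySem.Int.ofStr? a, PySem.Int.ofStr? b with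
    | some h, some m => some (h * 60 + m)
    | _, _ => none
  | _ => none

-- to_hhmm: divmod(m, 60) then f"{h:02d}:{m:02d}" (zero-fill after the sign, width 2 = zfill 2)
def pvToHhmm (m : Int) : String :=
  PySem.Str.zfill (PySem.Int.toStr (PySem.Int.floordiv m 60)) 2 ++ ":" ++
    PySem.Str.zfill (PySem.Int.toStr (PySem.Int.mod m 60)) 2

-- A's outer while with its inner 'while minutes_list[i+1] == end' lookahead; appends formatted pairs
def pvMergeA (interval : Int) : Int → Int → List Int → List (String × String)
  | s, e, [] => [(pvToHhmm s, pvToHhmm e)]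
  | s, e, x :: xs =>
    if x = e then pvMergeA interval s (x + interval) xs
    else (pvToHhmm s, pvToHhmm e) :: pvMergeA interval x (x + interval) xs

def slots_to_ranges (slots : List String) (interval_minutes : Int) : String :=
  if slots = [] then ""
  else
    match slots.mapM pvToMinutes? with
    | none => PySem.Str.join ", " slots          -- bare 'except: return ", ".join(slots)'
    | some ms =>
      let L := PySem.List.sorted (PySem.Set.ofList ms) (fun x => x) false
      let ranges : List (String × String) :=
        match L with
        | [] => []
        | m :: rest => pvMergeA interval_minutes m (m + interval_minutes) rest
      match ranges with
      | [] => ""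
      | [r] => "de " ++ r.1 ++ " a " ++ r.2
      | rs => PySem.Str.join " y " (rs.map (fun p => "de " ++ p.1 ++ " a " ++ p.2))

-- ===== PORT B =====
-- one step of Source B's backward loop: extend the head range or prepend a fresh one
def pvStep (interval : Int) (m : Int) (acc : List (Int × Int)) : List (Int × Int) :=
  match acc with
  | (a, b) :: rest => if a = m + interval then (m, b) :: rest else (m, m + interval) :: (a, b) :: rest
  | [] => [(m, m + interval)]

def slots_to_ranges_alt (slots : List String) (interval_minutes : Int) : String :=
  if slots = [] then ""
  else
    match slots.mapM pvToMinutes? with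
    | none => PySem.Str.join ", " slots
    | some ms =>
      let L := PySem.List.sorted (PySem.Set.ofList ms) (fun x => x) false
      -- 'for m in reversed(minutes): … insert(0, …)' = a right fold building the list front-first
      PySem.Str.join " y "
        ((L.foldr (pvStep interval_minutes) []).map
          (fun p => "de " ++ pvToHhmm p.1 ++ " a " ++ pvToHhmm p.2))

-- ===== PRECONDITION & SPEC =====
def Spec_slots_to_ranges (slots : List String) (interval_minutes : Int) (out : String) : Prop := out = slots_to_ranges_alt slots interval_minutes
instance (slots : List String) (interval_minutes : Int) (out : String) : Decidable (Spec_slots_to_ranges slots interval_minutes out) := by unfold Spec_slots_to_ranges; infer_instance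

-- ===== CLAIM (what is proved, stated in full; the proofs are below) =====
def Claim_equal_slots_to_ranges : Prop := ∀ (slots : List String) (interval_minutes : Int), Dom_slots_to_ranges slots interval_minutes → Spec_slots_to_ranges slots interval_minutes (slots_to_ranges slots interval_minutes)

-- ===== LEMMAS AND PROOFS =====

-- every pvMergeA result is a cons whose head is (pvToHhmm s, b) with b, tail independent of s
lemma pvMergeA_shape (i : Int) : ∀ (L : List Int) (e : Int),
    ∃ b r, ∀ s, pvMergeA i s e L = (pvToHhmm s, b) :: r := by
  intro L
  induction L with
  | nil => exact fun e => ⟨pvToHhmm e, [], fun s => rfl⟩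
  | cons x xs ih =>
    intro e
    by_cases hx : x = e
    · subst hx
      obtain ⟨b, r, h⟩ := ih (x + i)
      exact ⟨b, r, fun s => by simpa [pvMergeA] using h s⟩
    · exact ⟨pvToHhmm e, pvMergeA i x (x + i) xs, fun s => by simp [pvMergeA, hx]⟩

-- pvStep always produces a cons headed by m
lemma pvStep_shape (i m : Int) (acc : List (Int × Int)) :
    ∃ b r, pvStep i m acc = (m, b) :: r := by
  match acc with
  | [] => exact ⟨m + i, [], rfl⟩
  | (a, b) :: rest =>
    by_cases h : a = m + i
    · exact ⟨b, rest, by simp [pvStep, h]⟩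
    · exact ⟨m + i, (a, b) :: rest, by simp [pvStep, h]⟩

-- the merge loops agree: A's formatted ranges are B's integer ranges, formatted
lemma pvMergeA_eq_foldr (i : Int) : ∀ (L : List Int) (s : Int),
    pvMergeA i s (s + i) L
      = ((s :: L).foldr (pvStep i) []).map (fun p => (pvToHhmm p.1, pvToHhmm p.2)) := by
  intro L
  induction L with
  | nil => intro s; rfl
  | cons x xs ih =>
    intro s
    have hG := ih x
    obtain ⟨bg, rg, hg⟩ := pvStep_shape i x (xs.foldr (pvStep i) [])
    simp only [List.foldr_cons] at hG ⊢
    rw [hg] at hG ⊢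
    by_cases hx : x = s + i
    · obtain ⟨b', r', hshape⟩ := pvMergeA_shape i xs (x + i)
      have hxform : pvMergeA i x (x + i) xs = (pvToHhmm x, b') :: r' := hshape x
      rw [hxform] at hG
      have hb : b' = pvToHhmm bg := by
        simpa using congrArg (fun l => (l.headI : String × String).2) hG
      have hr : r' = rg.map (fun p => (pvToHhmm p.1, pvToHhmm p.2)) := by
        simpa using congrArg List.tail hG
      have : pvMergeA i s (s + i) (x :: xs) = (pvToHhmm s, b') :: r' := by
        simp only [pvMergeA, if_pos hx]
        exact hshape s
      rw [this, hb, hr]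
      simp [pvStep, hx]
    · have hA : pvMergeA i s (s + i) (x :: xs)
          = (pvToHhmm s, pvToHhmm (s + i)) :: pvMergeA i x (x + i) xs := by
        simp [pvMergeA, hx]
      rw [hA, hG]
      have hne : x ≠ s + i := hx
      simp [pvStep, hne]

lemma str_join_nil (sep : String) : PySem.Str.join sep [] = "" := rfl

lemma str_join_singleton (sep x : String) : PySem.Str.join sep [x] = x := by
  simp [PySem.Str.join, PySem.Chars.join, List.intercalate]

-- ===== VERDICT (by name: the statement is the Claim_ definition above) =====
theorem slots_to_ranges_spec : Claim_equal_slots_to_ranges := by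
  intro slots interval _
  unfold Spec_slots_to_ranges slots_to_ranges slots_to_ranges_alt
  by_cases hs : slots = []
  · simp [hs]
  · simp only [if_neg hs]
    match hparse : slots.mapM pvToMinutes? with
    | none => rfl
    | some ms =>
      simp only []
      match hL : PySem.List.sorted (PySem.Set.ofList ms) (fun x => x) false with
      | [] => simp [str_join_nil]
      | m :: rest =>
        show (match pvMergeA interval m (m + interval) rest with
          | [] => ""
          | [r] => "de " ++ r.1 ++ " a " ++ r.2
          | rs => PySem.Str.join " y " (rs.map (fun (p : String × String) => "de " ++ p.1 ++ " a " ++ p.2))) = _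
        rw [pvMergeA_eq_foldr]
        obtain ⟨b, r, hshape⟩ := pvStep_shape interval m (rest.foldr (pvStep interval) [])
        simp only [List.foldr_cons, hshape]
        match r with
        | [] => simp [str_join_singleton]
        | q :: qs => simp [List.map_map, Function.comp_def]
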